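-- pv_equiv track=rewrite | github.com/teoZait/battleplanes | backend/main.py | get_plane_positions
-- ===== SOURCE A (Python) =====
-- from typing import List, Dict, Optional, Tuple
-- from enum import Enum
--
-- class PlaneOrientation(str, Enum):
--     UP = "up"
--     DOWN = "down"
--     LEFT = "left"
--     RIGHT = "right"
--
-- PLANE_MATRIX_UP = [
--     ['.', '.', 'H', '.', '.'],
--     ['B', 'B', 'B', 'B', 'B'],
--     ['.', '.', 'B', '.', '.'],
--     ['.', 'B', 'B', 'B', '.'],
-- ]
--
-- def rotate_matrix_right(matrix):
--     return [list(row) for row in zip(*matrix[::-1])]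
--
-- def rotate_matrix_left(matrix):
--     return [list(row) for row in zip(*matrix)][::-1]
--
-- def rotate_matrix_180(matrix):
--     return [row[::-1] for row in matrix[::-1]]
--
-- def get_oriented_matrix(orientation: PlaneOrientation):
--     if orientation == PlaneOrientation.UP:
--         return PLANE_MATRIX_UP
--     elif orientation == PlaneOrientation.RIGHT:
--         return rotate_matrix_right(PLANE_MATRIX_UP)
--     elif orientation == PlaneOrientation.DOWN:
--         return rotate_matrix_180(PLANE_MATRIX_UP)
--     else:
--         return rotate_matrix_left(PLANE_MATRIX_UP)
--
-- def get_plane_positions(head_x: int, head_y: int, orientation: PlaneOrientation) -> Tuple[List[Tuple[int, int]], Tuple[int, int]]: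
--     matrix = get_oriented_matrix(orientation)
--
--     # Find H inside the matrix
--     head_mx = head_my = None
--     for my, row in enumerate(matrix):
--         for mx, cell in enumerate(row):
--             if cell == 'H':
--                 head_mx, head_my = mx, my
--                 break
--         if head_mx is not None:
--             break
--
--     positions = []
--     head_position = None
--
--     for my, row in enumerate(matrix):
--         for mx, cell in enumerate(row):
--             if cell in ('H', 'B'):
--                 board_x = head_x + (mx - head_mx)
--                 board_y = head_y + (my - head_my)
--
--                 if cell == 'H':
--                     head_position = (board_x, board_y)
--                 else:
--                     positions.append((board_x, board_y))
--
--     # Ensure head is first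
--     positions.insert(0, head_position)
--
--     return positions, head_position
-- ===== SOURCE B (Python) =====
-- # B: no matrix materialisation and no H-search: rotate each tile's (row,col)
-- # coordinates of the canonical UP plane with a closed-form map, translate by the
-- # rotated head, and sort the body tiles by rotated (row,col) to reproduce the
-- # row-major scan order of the rotated grid.
--
-- # (row, col) of the tiles of the UP plane; head is at (0, 2).
-- _HEAD_RC = (0, 2)
-- _BODY_RC = [(1, 0), (1, 1), (1, 2), (1, 3), (1, 4),
--             (2, 2), (3, 1), (3, 2), (3, 3)]
--
-- def _rotate(orientation):
--     # coordinate image of (r, c) of the 4x5 UP grid under the orientation's rotation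
--     if orientation == "up":
--         return lambda r, c: (r, c)
--     elif orientation == "right":
--         return lambda r, c: (c, 3 - r)
--     elif orientation == "down":
--         return lambda r, c: (3 - r, 4 - c)
--     else:
--         return lambda r, c: (4 - c, r)
--
-- def get_plane_positions(head_x, head_y, orientation):
--     rot = _rotate(orientation)
--     hr, hc = rot(*_HEAD_RC)
--     body = sorted(rot(r, c) for r, c in _BODY_RC)
--     head_position = (head_x, head_y)
--     positions = [head_position] + [(head_x + c - hc, head_y + r - hr) for r, c in body]
--     return positions, head_position
-- ===== Notes on version B (the rewrite author's own statement) =====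
-- stated objective: alternative
-- what changed: B drops A's matrix materialisation (zip/reverse rotations), H-search loop and row-major matrix scan entirely: it rotates each tile's (row,col) of the canonical UP plane with a closed-form coordinate map, translates by the rotated head, and sorts the body tiles by rotated (row,col) to reproduce A's scan order.
import Mathlib
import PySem

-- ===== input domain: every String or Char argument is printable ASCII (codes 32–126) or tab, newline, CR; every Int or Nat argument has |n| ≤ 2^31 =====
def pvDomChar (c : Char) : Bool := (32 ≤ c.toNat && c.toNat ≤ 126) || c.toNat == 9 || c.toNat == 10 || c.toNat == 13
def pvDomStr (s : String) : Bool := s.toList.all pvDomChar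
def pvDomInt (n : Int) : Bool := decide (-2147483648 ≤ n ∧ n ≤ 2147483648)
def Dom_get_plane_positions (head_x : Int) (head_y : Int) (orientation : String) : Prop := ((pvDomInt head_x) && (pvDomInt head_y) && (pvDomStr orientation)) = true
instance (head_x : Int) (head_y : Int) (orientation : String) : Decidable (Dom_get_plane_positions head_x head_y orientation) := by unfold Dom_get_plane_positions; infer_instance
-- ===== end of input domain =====

-- B replaces A's matrix rotation plus H-search with a closed-form coordinate
-- rotation of the tile list and a sort (objective: alternative decomposition).

-- ===== PORT A =====
def pvPlaneMatrixUp : List (List Char) :=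
  [['.', '.', 'H', '.', '.'],
   ['B', 'B', 'B', 'B', 'B'],
   ['.', '.', 'B', '.', '.'],
   ['.', 'B', 'B', 'B', '.']]

-- zip(*m): exact for rectangular matrices (the only inputs it receives here)
def pvZipStar (m : List (List Char)) : List (List Char) :=
  match m with
  | [] => []
  | r :: _ => (List.range r.length).map (fun j => m.map (fun row => row.getD j ' '))

def pvRotateMatrixRight (m : List (List Char)) : List (List Char) :=
  pvZipStar m.reverse

def pvRotateMatrixLeft (m : List (List Char)) : List (List Char) :=
  (pvZipStar m).reverse

def pvRotateMatrix180 (m : List (List Char)) : List (List Char) :=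
  m.reverse.map (·.reverse)

def pvGetOrientedMatrix (orientation : String) : List (List Char) :=
  if orientation = "up" then pvPlaneMatrixUp
  else if orientation = "right" then pvRotateMatrixRight pvPlaneMatrixUp
  else if orientation = "down" then pvRotateMatrix180 pvPlaneMatrixUp
  else pvRotateMatrixLeft pvPlaneMatrixUp

-- the nested H-search loops with break: first 'H' in row-major order, as (mx, my)
def pvFindHead (m : List (List Char)) : Option (Int × Int) :=
  (PySem.List.enumerate m).foldl (fun acc p =>
    match acc with
    | some _ => acc
    | none =>
      (PySem.List.enumerate p.2).foldl (fun acc2 q =>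
        match acc2 with
        | some _ => acc2
        | none => if q.2 = 'H' then some (q.1, p.1) else none) none) none

def get_plane_positions (head_x : Int) (head_y : Int) (orientation : String) : (List (Int × Int)) × (Int × Int) :=
  let matrix := pvGetOrientedMatrix orientation
  -- 'H' is always present in the constant matrix, so the default of getD is never used
  let hm := (pvFindHead matrix).getD (0, 0)
  let st :=
    (PySem.List.enumerate matrix).foldl (fun (st : List (Int × Int) × Option (Int × Int)) p =>
      (PySem.List.enumerate p.2).foldl (fun st q =>
        if q.2 = 'H' ∨ q.2 = 'B' then
          let board_x := head_x + (q.1 - hm.1)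
          let board_y := head_y + (p.1 - hm.2)
          if q.2 = 'H' then (st.1, some (board_x, board_y))
          else (st.1 ++ [(board_x, board_y)], st.2)
        else st) st) ([], none)
  -- head_position is always set by the loop (one 'H' in every oriented matrix)
  let head_position := st.2.getD (0, 0)
  (head_position :: st.1, head_position)

-- ===== PORT B =====
-- (row, col) of the body tiles of the UP plane; the head is at (0, 2)
def pvBodyRC : List (Int × Int) :=
  [(1, 0), (1, 1), (1, 2), (1, 3), (1, 4), (2, 2), (3, 1), (3, 2), (3, 3)]

-- closed-form image of (row, col) of the 4x5 UP grid under the orientation's rotation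
def pvRotate (orientation : String) (rc : Int × Int) : Int × Int :=
  if orientation = "up" then rc
  else if orientation = "right" then (rc.2, 3 - rc.1)
  else if orientation = "down" then (3 - rc.1, 4 - rc.2)
  else (4 - rc.2, rc.1)

def get_plane_positions_alt (head_x : Int) (head_y : Int) (orientation : String) : (List (Int × Int)) × (Int × Int) :=
  let hm := pvRotate orientation (0, 2)
  let body := PySem.List.sorted2 (pvBodyRC.map (pvRotate orientation)) (fun p => p.1) (fun p => p.2)
  let head_position := (head_x, head_y)
  (head_position :: body.map (fun p => (head_x + p.2 - hm.2, head_y + p.1 - hm.1)), head_position)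

-- ===== PRECONDITION & SPEC =====
def Spec_get_plane_positions (head_x : Int) (head_y : Int) (orientation : String) (out : (List (Int × Int)) × (Int × Int)) : Prop := out = get_plane_positions_alt head_x head_y orientation
instance (head_x : Int) (head_y : Int) (orientation : String) (out : (List (Int × Int)) × (Int × Int)) : Decidable (Spec_get_plane_positions head_x head_y orientation out) := by unfold Spec_get_plane_positions; infer_instance

-- ===== CLAIM (what is proved, stated in full; the proofs are below) =====
def Claim_equal_get_plane_positions : Prop := ∀ (head_x : Int) (head_y : Int) (orientation : String), Dom_get_plane_positions head_x head_y orientation → Spec_get_plane_positions head_x head_y orientation (get_plane_positions head_x head_y orientation)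

-- ===== LEMMAS AND PROOFS =====
theorem pv_case_up (hx hy : Int) :
    get_plane_positions hx hy "up" = get_plane_positions_alt hx hy "up" := by
  have hA : get_plane_positions hx hy "up"
      = ((hx + 0, hy + 0) :: [(hx + -2, hy + 1), (hx + -1, hy + 1), (hx + 0, hy + 1), (hx + 1, hy + 1), (hx + 2, hy + 1), (hx + 0, hy + 2), (hx + -1, hy + 3), (hx + 0, hy + 3), (hx + 1, hy + 3)], (hx + 0, hy + 0)) := rfl
  have hB : get_plane_positions_alt hx hy "up"
      = ((hx, hy) :: [(hx + 0 - 2, hy + 1 - 0), (hx + 1 - 2, hy + 1 - 0), (hx + 2 - 2, hy + 1 - 0), (hx + 3 - 2, hy + 1 - 0), (hx + 4 - 2, hy + 1 - 0), (hx + 2 - 2, hy + 2 - 0), (hx + 1 - 2, hy + 3 - 0), (hx + 2 - 2, hy + 3 - 0), (hx + 3 - 2, hy + 3 - 0)], (hx, hy)) := rfl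
  rw [hA, hB]; norm_num
  all_goals omega

theorem pv_case_right (hx hy : Int) :
    get_plane_positions hx hy "right" = get_plane_positions_alt hx hy "right" := by
  have hA : get_plane_positions hx hy "right"
      = ((hx + 0, hy + 0) :: [(hx + -1, hy + -2), (hx + -3, hy + -1), (hx + -1, hy + -1), (hx + -3, hy + 0), (hx + -2, hy + 0), (hx + -1, hy + 0), (hx + -3, hy + 1), (hx + -1, hy + 1), (hx + -1, hy + 2)], (hx + 0, hy + 0)) := rfl
  have hB : get_plane_positions_alt hx hy "right"
      = ((hx, hy) :: [(hx + 2 - 3, hy + 0 - 2), (hx + 0 - 3, hy + 1 - 2), (hx + 2 - 3, hy + 1 - 2), (hx + 0 - 3, hy + 2 - 2), (hx + 1 - 3, hy + 2 - 2), (hx + 2 - 3, hy + 2 - 2), (hx + 0 - 3, hy + 3 - 2), (hx + 2 - 3, hy + 3 - 2), (hx + 2 - 3, hy + 4 - 2)], (hx, hy)) := rfl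
  rw [hA, hB]; norm_num
  all_goals omega

theorem pv_case_down (hx hy : Int) :
    get_plane_positions hx hy "down" = get_plane_positions_alt hx hy "down" := by
  have hA : get_plane_positions hx hy "down"
      = ((hx + 0, hy + 0) :: [(hx + -1, hy + -3), (hx + 0, hy + -3), (hx + 1, hy + -3), (hx + 0, hy + -2), (hx + -2, hy + -1), (hx + -1, hy + -1), (hx + 0, hy + -1), (hx + 1, hy + -1), (hx + 2, hy + -1)], (hx + 0, hy + 0)) := rfl
  have hB : get_plane_positions_alt hx hy "down"
      = ((hx, hy) :: [(hx + 1 - 2, hy + 0 - 3), (hx + 2 - 2, hy + 0 - 3), (hx + 3 - 2, hy + 0 - 3), (hx + 2 - 2, hy + 1 - 3), (hx + 0 - 2, hy + 2 - 3), (hx + 1 - 2, hy + 2 - 3), (hx + 2 - 2, hy + 2 - 3), (hx + 3 - 2, hy + 2 - 3), (hx + 4 - 2, hy + 2 - 3)], (hx, hy)) := rfl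
  rw [hA, hB]; norm_num
  all_goals omega

theorem pv_case_other (hx hy : Int) (o : String)
    (h1 : ¬ o = "up") (h2 : ¬ o = "right") (h3 : ¬ o = "down") :
    get_plane_positions hx hy o = get_plane_positions_alt hx hy o := by
  have hmat : pvGetOrientedMatrix o
      = [['.', 'B', '.', '.'], ['.', 'B', '.', 'B'], ['H', 'B', 'B', 'B'], ['.', 'B', '.', 'B'], ['.', 'B', '.', '.']] := by
    unfold pvGetOrientedMatrix
    rw [if_neg h1, if_neg h2, if_neg h3]
    rfl
  have hrot : pvRotate o = fun rc => (4 - rc.2, rc.1) := by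
    funext rc
    unfold pvRotate
    rw [if_neg h1, if_neg h2, if_neg h3]
  have hA : get_plane_positions hx hy o
      = ((hx + 0, hy + 0) :: [(hx + 1, hy + -2), (hx + 1, hy + -1), (hx + 3, hy + -1), (hx + 1, hy + 0), (hx + 2, hy + 0), (hx + 3, hy + 0), (hx + 1, hy + 1), (hx + 3, hy + 1), (hx + 1, hy + 2)], (hx + 0, hy + 0)) := by
    unfold get_plane_positions
    rw [hmat]
    rfl
  have hB : get_plane_positions_alt hx hy o
      = ((hx, hy) :: [(hx + 1 - 0, hy + 0 - 2), (hx + 1 - 0, hy + 1 - 2), (hx + 3 - 0, hy + 1 - 2), (hx + 1 - 0, hy + 2 - 2), (hx + 2 - 0, hy + 2 - 2), (hx + 3 - 0, hy + 2 - 2), (hx + 1 - 0, hy + 3 - 2), (hx + 3 - 0, hy + 3 - 2), (hx + 1 - 0, hy + 4 - 2)], (hx, hy)) := by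
    unfold get_plane_positions_alt
    rw [hrot]
    rfl
  rw [hA, hB]; norm_num
  all_goals omega

-- ===== VERDICT (by name: the statement is the Claim_ definition above) =====
theorem get_plane_positions_spec : Claim_equal_get_plane_positions := by
  intro hx hy o _
  show get_plane_positions hx hy o = get_plane_positions_alt hx hy o
  by_cases h1 : o = "up"
  · subst h1; exact pv_case_up hx hy
  · by_cases h2 : o = "right"
    · subst h2; exact pv_case_right hx hy
    · by_cases h3 : o = "down"
      · subst h3; exact pv_case_down hx hy
      · exact pv_case_other hx hy o h1 h2 h3
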